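-- pv_equiv track=rewrite | github.com/radical-cybertools/radical.edge | src/radical/edge/batch_system_pbs.py | _parse_qstat_f
-- ===== SOURCE A (Python) =====
-- def _parse_qstat_f(stdout: str) -> dict:
--     """Parse ``qstat -f <jobid>`` text output into a {key: value} dict.
--
--     PBSPro indents every attribute line (``    key = value``).  Continuation
--     lines for long values are indented *more* than attribute lines and may
--     themselves contain ``=`` characters (e.g. inside ``Resource_List.select``).
--     The rule used here: the first indented attribute line sets the
--     *attribute-indent* width; any line indented strictly deeper is a
--     continuation of the prior key.
--     Section headers like ``Job Id: 12345`` are ignored.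
--     """
--     result = {}
--     cur_key = None
--     cur_val_parts = []
--     attr_indent = None    # set by the first attribute line we see
--
--     def _flush():
--         if cur_key is not None:
--             result[cur_key] = ''.join(cur_val_parts).strip()
--
--     for raw in stdout.splitlines():
--         if not raw or not raw.strip():
--             continue
--         stripped = raw.strip()
--         if stripped.startswith('Job Id:'):
--             continue
--         indent = len(raw) - len(raw.lstrip())
--         is_continuation = (attr_indent is not None
--                            and indent > attr_indent
--                            and cur_key is not None)
--         if is_continuation:
--             cur_val_parts.append(stripped)
--             continue
--         if attr_indent is None:
--             attr_indent = indent
--         # A new attribute line.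
--         if '=' in stripped:
--             _flush()
--             k, v = stripped.split('=', 1)
--             cur_key = k.strip()
--             cur_val_parts = [v.strip()]
--         elif cur_key is not None:
--             # No '=' and not deeper indented → treat as plain continuation.
--             cur_val_parts.append(stripped)
--     _flush()
--     return result
-- ===== SOURCE B (Python) =====
-- def _parse_qstat_f(stdout: str) -> dict:
--     # Recursive decomposition: filter the relevant lines, fix the attribute
--     # indent from the first one, recursively split off one (head, continuations)
--     # block at a time, and build the dict from the resulting pair list at the end.
--     lines = [l for l in stdout.splitlines()
--              if l.strip() and not l.strip().startswith('Job Id:')]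
--     if not lines:
--         return {}
--     ai = len(lines[0]) - len(lines[0].lstrip())
--
--     def is_cont(l):
--         return '=' not in l.strip() or len(l) - len(l.lstrip()) > ai
--
--     def split_block(ls):
--         # longest prefix of continuation lines (stripped), and the remainder
--         if ls and is_cont(ls[0]):
--             conts, rest = split_block(ls[1:])
--             return [ls[0].strip()] + conts, rest
--         return [], ls
--
--     def drop_pre(ls):
--         # lines before the first key line carry no '=' and are dropped
--         if ls and '=' not in ls[0].strip():
--             return drop_pre(ls[1:])
--         return ls
--
--     def parse(ls):
--         if not ls:
--             return []
--         conts, rest = split_block(ls[1:])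
--         k, v = ls[0].strip().split('=', 1)
--         return [(k.strip(), ''.join([v.strip()] + conts).strip())] + parse(rest)
--
--     return dict(parse(drop_pre(lines)))
-- ===== Notes on version B (the rewrite author's own statement) =====
-- stated objective: alternative
-- what changed: A's single stateful loop (cur_key/cur_val_parts/attr_indent mutated in place, closure-based flush, dict built inline) is replaced by a recursive decomposition: filter the lines, drop the leading no-'=' lines recursively, recursively split off one (head, continuations) block at a time via a recursive split_block, and finally build the dict from the resulting (key, value) pair list with dict().
import Mathlib
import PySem

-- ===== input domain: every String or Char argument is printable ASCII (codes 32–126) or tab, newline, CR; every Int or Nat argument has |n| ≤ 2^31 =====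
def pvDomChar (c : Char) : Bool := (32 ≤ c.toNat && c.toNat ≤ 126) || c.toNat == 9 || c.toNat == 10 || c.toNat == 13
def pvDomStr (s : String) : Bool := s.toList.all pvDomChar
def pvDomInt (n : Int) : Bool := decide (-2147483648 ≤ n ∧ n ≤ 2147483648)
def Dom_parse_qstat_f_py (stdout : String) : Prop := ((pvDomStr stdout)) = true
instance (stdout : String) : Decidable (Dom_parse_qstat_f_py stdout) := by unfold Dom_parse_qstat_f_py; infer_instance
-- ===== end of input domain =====

-- B replaces A's single stateful loop by a recursive decomposition (drop leading no-'=' lines,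
-- recursively split off one block at a time, build the dict from the pair list at the end);
-- objective: alternative decomposition, same asymptotic cost.

-- indent of a line: len(raw) - len(raw.lstrip())  (shared by both Pythons verbatim)
def pvIndent (raw : String) : Int :=
  PySem.Str.len raw - PySem.Str.len (PySem.Str.lstrip raw)

-- s.split('=', 1) with '=' in s; both Pythons call it under the same guard
def pvSplitEq1 (s : String) : String × String :=
  match PySem.Str.splitMax? s "=" 1 with
  | some (k :: v :: _) => (k, v)
  | _ => (s, "")

-- ===== PORT A =====
-- A's loop state: (result dict, cur_key, cur_val_parts, attr_indent)
def pvStepA (st : PySem.Dict String String × Option String × List String × Option Int)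
    (raw : String) : PySem.Dict String String × Option String × List String × Option Int :=
  let (res, curKey, parts, attrIndent) := st
  let stripped := PySem.Str.strip raw
  if stripped = "" then st
  else if PySem.Str.startswith stripped "Job Id:" then st
  else
    let indent := pvIndent raw
    let isCont : Bool :=
      match attrIndent, curKey with
      | some ai, some _ => decide (indent > ai)
      | _, _ => false
    if isCont then (res, curKey, parts ++ [stripped], attrIndent)
    else
      let attrIndent' := some (attrIndent.getD indent)
      if PySem.Str.isIn "=" stripped then
        let res' := match curKey with
          | some k => res.insert k (PySem.Str.strip (PySem.Str.join "" parts))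
          | none => res
        let kv := pvSplitEq1 stripped
        (res', some (PySem.Str.strip kv.1), [PySem.Str.strip kv.2], attrIndent')
      else match curKey with
        | some _ => (res, curKey, parts ++ [stripped], attrIndent')
        | none => (res, curKey, parts, attrIndent')

-- A's _flush, applied to the final loop state
def pvFinA (st : PySem.Dict String String × Option String × List String × Option Int) :
    PySem.Dict String String :=
  match st.2.1 with
  | some k => st.1.insert k (PySem.Str.strip (PySem.Str.join "" st.2.2.1))
  | none => st.1

def parse_qstat_f_py (stdout : String) : List (String × String) :=
  (pvFinA ((PySem.Str.splitlines stdout).foldl pvStepA (PySem.Dict.empty, none, [], none))).items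

-- ===== PORT B =====
def pvKeep (l : String) : Bool :=
  PySem.Str.strip l != "" && !(PySem.Str.startswith (PySem.Str.strip l) "Job Id:")

-- B's is_cont
def pvIsCont (ai : Int) (l : String) : Bool :=
  !(PySem.Str.isIn "=" (PySem.Str.strip l)) || decide (pvIndent l > ai)

-- B's split_block: longest prefix of continuation lines (stripped), and the remainder
def pvSplitBlock (ai : Int) : List String → List String × List String
  | [] => ([], [])
  | l :: ls =>
    if pvIsCont ai l then
      let r := pvSplitBlock ai ls
      (PySem.Str.strip l :: r.1, r.2)
    else ([], l :: ls)

-- B's drop_pre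
def pvDropPre : List String → List String
  | [] => []
  | l :: ls => if !(PySem.Str.isIn "=" (PySem.Str.strip l)) then pvDropPre ls else l :: ls

-- termination measure for pvParse (cited in its decreasing_by)
theorem pvSplitBlock_rest_le (ai : Int) (ls : List String) :
    (pvSplitBlock ai ls).2.length ≤ ls.length := by
  induction ls with
  | nil => simp [pvSplitBlock]
  | cons l t ih =>
    simp only [pvSplitBlock]
    split_ifs with h
    · exact Nat.le_succ_of_le ih
    · simp

-- B's parse
def pvParse (ai : Int) : List String → List (String × String)
  | [] => []
  | l :: ls =>
    let kv := pvSplitEq1 (PySem.Str.strip l)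
    (PySem.Str.strip kv.1,
      PySem.Str.strip (PySem.Str.join "" (PySem.Str.strip kv.2 :: (pvSplitBlock ai ls).1))) ::
      pvParse ai (pvSplitBlock ai ls).2
termination_by ls => ls.length
decreasing_by exact Nat.lt_succ_of_le (pvSplitBlock_rest_le ai ls)

def pvIns (d : PySem.Dict String String) (q : String × String) : PySem.Dict String String :=
  d.insert q.1 q.2

def parse_qstat_f_py_alt (stdout : String) : List (String × String) :=
  let lines := (PySem.Str.splitlines stdout).filter pvKeep
  match lines with
  | [] => []
  | first :: _ =>
    ((pvParse (pvIndent first) (pvDropPre lines)).foldl pvIns PySem.Dict.empty).items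

-- ===== PRECONDITION & SPEC =====
def Spec_parse_qstat_f_py (stdout : String) (out : List (String × String)) : Prop := out = parse_qstat_f_py_alt stdout
instance (stdout : String) (out : List (String × String)) : Decidable (Spec_parse_qstat_f_py stdout out) := by unfold Spec_parse_qstat_f_py; infer_instance

-- ===== CLAIM =====
def Claim_equal_parse_qstat_f_py : Prop := ∀ (stdout : String), Dom_parse_qstat_f_py stdout → Spec_parse_qstat_f_py stdout (parse_qstat_f_py stdout)

-- ===== LEMMAS AND PROOFS =====

-- A's step is the identity on lines B's filter drops
theorem pvStepA_skip (st : PySem.Dict String String × Option String × List String × Option Int)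
    (raw : String) (h : pvKeep raw = false) : pvStepA st raw = st := by
  obtain ⟨res, ck, parts, ai⟩ := st
  simp only [pvKeep, Bool.and_eq_false_iff, bne_eq_false_iff_eq, Bool.not_eq_false'] at h
  simp only [pvStepA]
  rcases h with h | h
  · rw [if_pos h]
  · by_cases hs : PySem.Str.strip raw = ""
    · rw [if_pos hs]
    · rw [if_neg hs, if_pos h]

theorem pvFoldA_filter (ls : List String)
    (st : PySem.Dict String String × Option String × List String × Option Int) :
    ls.foldl pvStepA st = (ls.filter pvKeep).foldl pvStepA st := by
  induction ls generalizing st with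
  | nil => rfl
  | cons x xs ih =>
    by_cases h : pvKeep x = true
    · simp [h, ih]
    · simp only [Bool.not_eq_true] at h
      simp [h, pvStepA_skip _ _ h, ih]

-- on a kept line, with attr_indent still unset, A's first step sets it to that line's indent
theorem pvStepA_seed (res : PySem.Dict String String) (raw : String) (h : pvKeep raw = true) :
    pvStepA (res, none, [], none) raw = pvStepA (res, none, [], some (pvIndent raw)) raw := by
  simp only [pvKeep, Bool.and_eq_true, bne_iff_ne, ne_eq, Bool.not_eq_true'] at h
  have hj : ¬ (PySem.Str.startswith (PySem.Str.strip raw) "Job Id:" = true) := by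
    simp only [h.2]; exact Bool.false_ne_true
  simp only [pvStepA]
  rw [if_neg h.1, if_neg h.1, if_neg hj, if_neg hj]
  simp

-- a kept line with no '=' leaves A's pre-first-key state unchanged
theorem pvStepA_pre (res : PySem.Dict String String) (ai : Int) (raw : String)
    (hk : pvKeep raw = true) (h : PySem.Str.isIn "=" (PySem.Str.strip raw) = false) :
    pvStepA (res, none, [], some ai) raw = (res, none, [], some ai) := by
  simp only [pvKeep, Bool.and_eq_true, bne_iff_ne, ne_eq, Bool.not_eq_true'] at hk
  have hj : ¬ (PySem.Str.startswith (PySem.Str.strip raw) "Job Id:" = true) := by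
    simp only [hk.2]; exact Bool.false_ne_true
  simp only [pvStepA]
  rw [if_neg hk.1, if_neg hj, if_neg Bool.false_ne_true, if_neg (by rw [h]; exact Bool.false_ne_true)]
  rfl

-- a kept line with '=' seen with no current key starts the first block
theorem pvStepA_head (res : PySem.Dict String String) (ai : Int) (raw : String)
    (hk : pvKeep raw = true) (h : PySem.Str.isIn "=" (PySem.Str.strip raw) = true) :
    pvStepA (res, none, [], some ai) raw =
      (res, some (PySem.Str.strip (pvSplitEq1 (PySem.Str.strip raw)).1),
        [PySem.Str.strip (pvSplitEq1 (PySem.Str.strip raw)).2], some ai) := by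
  simp only [pvKeep, Bool.and_eq_true, bne_iff_ne, ne_eq, Bool.not_eq_true'] at hk
  have hj : ¬ (PySem.Str.startswith (PySem.Str.strip raw) "Job Id:" = true) := by
    simp only [hk.2]; exact Bool.false_ne_true
  simp only [pvStepA]
  rw [if_neg hk.1, if_neg hj, if_neg Bool.false_ne_true, if_pos h]
  rfl

theorem pvDropPre_subset (ls : List String) (l : String) (h : l ∈ pvDropPre ls) : l ∈ ls := by
  induction ls with
  | nil => simp [pvDropPre] at h
  | cons x xs ih =>
    simp only [pvDropPre] at h
    split_ifs at h with hx
    · exact List.mem_cons_of_mem _ (ih h)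
    · exact h

theorem pvDropPre_head (ls : List String) (h t' : _) (heq : pvDropPre ls = h :: t') :
    PySem.Str.isIn "=" (PySem.Str.strip h) = true := by
  induction ls with
  | nil => simp [pvDropPre] at heq
  | cons x xs ih =>
    simp only [pvDropPre] at heq
    split_ifs at heq with hx
    · exact ih heq
    · cases heq
      simpa using hx

-- leading no-'=' lines are no-ops for A's fold
theorem pvFold_dropPre (ls : List String) (hk : ∀ l ∈ ls, pvKeep l = true)
    (res : PySem.Dict String String) (ai : Int) :
    ls.foldl pvStepA (res, none, [], some ai) =
      (pvDropPre ls).foldl pvStepA (res, none, [], some ai) := by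
  induction ls with
  | nil => rfl
  | cons x xs ih =>
    simp only [pvDropPre]
    split_ifs with hx
    · simp only [Bool.not_eq_true'] at hx
      rw [List.foldl_cons, pvStepA_pre res ai x (hk x (List.mem_cons_self ..)) hx]
      exact ih (fun l hl => hk l (List.mem_cons_of_mem _ hl))
    · rfl

-- main simulation: with a current key, A's remaining fold computes B's block list
theorem pvMain (ai : Int) (ls : List String) (hk : ∀ l ∈ ls, pvKeep l = true)
    (res : PySem.Dict String String) (k : String) (p : List String) :
    pvFinA (ls.foldl pvStepA (res, some k, p, some ai)) =
      ((k, PySem.Str.strip (PySem.Str.join "" (p ++ (pvSplitBlock ai ls).1))) ::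
        pvParse ai (pvSplitBlock ai ls).2).foldl pvIns res := by
  induction ls generalizing res k p with
  | nil => simp [pvSplitBlock, pvParse, pvFinA, pvIns]
  | cons l t ih =>
    have hkl := hk l (List.mem_cons_self ..)
    have hkt : ∀ x ∈ t, pvKeep x = true := fun x hx => hk x (List.mem_cons_of_mem _ hx)
    simp only [pvKeep, Bool.and_eq_true, bne_iff_ne, ne_eq, Bool.not_eq_true'] at hkl
    have hj : ¬ (PySem.Str.startswith (PySem.Str.strip l) "Job Id:" = true) := by
      simp only [hkl.2]; exact Bool.false_ne_true
    by_cases hc : pvIsCont ai l = true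
    · -- continuation of the current key
      have hstep : pvStepA (res, some k, p, some ai) l =
          (res, some k, p ++ [PySem.Str.strip l], some ai) := by
        simp only [pvStepA]
        rw [if_neg hkl.1, if_neg hj]
        by_cases hind : decide (pvIndent l > ai) = true
        · rw [if_pos hind]
        · have hind' : decide (pvIndent l > ai) = false := by
            simpa using hind
          have hne : PySem.Str.isIn "=" (PySem.Str.strip l) = false := by
            simp only [pvIsCont, Bool.or_eq_true, Bool.not_eq_true'] at hc
            rcases hc with h | h
            · exact h
            · exact absurd h hind
          rw [if_neg (by rw [hind']; exact Bool.false_ne_true),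
            if_neg (by rw [hne]; exact Bool.false_ne_true)]
          rfl
      rw [List.foldl_cons, hstep, ih hkt]
      have hsb : pvSplitBlock ai (l :: t) =
          (PySem.Str.strip l :: (pvSplitBlock ai t).1, (pvSplitBlock ai t).2) := by
        rw [pvSplitBlock, if_pos hc]
      rw [hsb]
      simp [List.append_assoc]
    · -- new head line: flush and start a new block
      have hc' := hc
      simp only [pvIsCont, Bool.or_eq_true, Bool.not_eq_true', not_or, Bool.not_eq_false] at hc'
      obtain ⟨heq, hind⟩ := hc'
      have hind' : decide (pvIndent l > ai) = false := by
        simpa using hind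
      have hstep : pvStepA (res, some k, p, some ai) l =
          (res.insert k (PySem.Str.strip (PySem.Str.join "" p)),
            some (PySem.Str.strip (pvSplitEq1 (PySem.Str.strip l)).1),
            [PySem.Str.strip (pvSplitEq1 (PySem.Str.strip l)).2], some ai) := by
        simp only [pvStepA]
        rw [if_neg hkl.1, if_neg hj,
          if_neg (by rw [hind']; exact Bool.false_ne_true), if_pos heq]
        rfl
      rw [List.foldl_cons, hstep, ih hkt]
      have hsb : pvSplitBlock ai (l :: t) = ([], l :: t) := by
        simp only [pvSplitBlock]
        rw [if_neg hc]
      rw [hsb]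
      simp only [List.append_nil]
      rw [pvParse]
      simp [pvIns]

-- ===== VERDICT =====
theorem parse_qstat_f_py_spec : Claim_equal_parse_qstat_f_py := by
  intro stdout _
  unfold Spec_parse_qstat_f_py parse_qstat_f_py parse_qstat_f_py_alt
  rw [pvFoldA_filter]
  cases hls : (PySem.Str.splitlines stdout).filter pvKeep with
  | nil => rfl
  | cons first rest =>
    have hall : ∀ l ∈ first :: rest, pvKeep l = true := by
      intro l hl
      exact List.of_mem_filter (hls ▸ hl)
    simp only [List.foldl_cons]
    rw [pvStepA_seed _ _ (hall first (List.mem_cons_self ..)), ← List.foldl_cons,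
      pvFold_dropPre (first :: rest) hall PySem.Dict.empty (pvIndent first)]
    cases hd : pvDropPre (first :: rest) with
    | nil => simp [pvParse, pvFinA]
    | cons h t =>
      have hmem : h ∈ first :: rest := pvDropPre_subset _ _ (hd ▸ List.mem_cons_self ..)
      have hhe := pvDropPre_head (first :: rest) h t hd
      have hallt : ∀ x ∈ t, pvKeep x = true := fun x hx =>
        hall x (pvDropPre_subset _ _ (hd ▸ List.mem_cons_of_mem _ hx))
      rw [List.foldl_cons, pvStepA_head _ _ _ (hall h hmem) hhe, pvMain _ t hallt]
      rw [pvParse]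
      rfl
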